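-- pv_equiv track=rewrite | github.com/abh2050/AI_sommelier | app1.py | truncate_context
-- ===== SOURCE A (Python) =====
-- def estimate_tokens(text):
--     """Roughly estimate the number of tokens in a text."""
--     # A simple estimation: 1 token ≈ 4 characters in English
--     return len(text) // 4
--
-- def truncate_context(texts, sources, max_tokens=6000):
--     """Intelligently truncate context to fit within token limits."""
--     if not texts or not sources:
--         return [], []
--
--     result_texts = []
--     result_sources = []
--     total_tokens = 0
--
--     # First, include shorter contexts (prioritizing concise information)
--     items = list(zip(texts, sources))
--     items.sort(key=lambda x: len(x[0]))  # Sort by text length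
--
--     for text, source in items:
--         tokens = estimate_tokens(text)
--         if total_tokens + tokens <= max_tokens:
--             result_texts.append(text)
--             result_sources.append(source)
--             total_tokens += tokens
--         else:
--             # If we can fit a partial chunk, do so for the first one only
--             if not result_texts:
--                 # For the first chunk, include a truncated version
--                 chars_to_keep = (max_tokens * 4) - 100  # Leave some margin
--                 if chars_to_keep > 0:
--                     truncated = text[:chars_to_keep] + "..."
--                     result_texts.append(truncated)
--                     result_sources.append(source)
--             break
--
--     return result_texts, result_sources
-- ===== SOURCE B (Python) =====
-- from itertools import accumulate
-- from bisect import bisect_right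
--
-- def truncate_context(texts, sources, max_tokens=6000):
--     """Table-driven variant: cumulative token sums + binary search for the cut point."""
--     if not texts or not sources:
--         return [], []
--     items = sorted(zip(texts, sources), key=lambda x: len(x[0]))
--     cumsums = list(accumulate(len(t) // 4 for t, _ in items))
--     k = bisect_right(cumsums, max_tokens)
--     if k >= 1:
--         return [t for t, _ in items[:k]], [s for _, s in items[:k]]
--     chars_to_keep = (max_tokens * 4) - 100
--     if chars_to_keep > 0:
--         t0, s0 = items[0]
--         return [t0[:chars_to_keep] + "..."], [s0]
--     return [], []
-- ===== Notes on version B (the rewrite author's own statement) =====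
-- stated objective: alternative
-- what changed: A's greedy accumulate-and-break loop over the length-sorted items is replaced by a precomputed cumulative token-sum table with bisect_right finding the cut point k, then one slice; the k==0 first-chunk truncation and empty guard are kept.
import Mathlib
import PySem

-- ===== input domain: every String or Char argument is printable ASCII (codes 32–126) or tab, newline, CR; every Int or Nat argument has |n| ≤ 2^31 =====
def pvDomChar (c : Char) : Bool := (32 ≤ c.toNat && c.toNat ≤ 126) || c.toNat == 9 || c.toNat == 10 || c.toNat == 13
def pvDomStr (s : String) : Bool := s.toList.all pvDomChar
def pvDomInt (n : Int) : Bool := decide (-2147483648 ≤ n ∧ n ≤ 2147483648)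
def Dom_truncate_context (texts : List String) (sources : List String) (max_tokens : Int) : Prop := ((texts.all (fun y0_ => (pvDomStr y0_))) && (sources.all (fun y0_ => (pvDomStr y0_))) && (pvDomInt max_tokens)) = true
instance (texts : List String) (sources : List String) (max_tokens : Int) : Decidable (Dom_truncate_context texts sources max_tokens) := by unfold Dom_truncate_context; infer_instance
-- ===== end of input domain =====

-- B replaces A's greedy accumulate-and-break loop by a cumulative-sum table plus
-- bisect_right cut point over the same stable length-sort (objective: alternative).

-- ===== PORT A =====
-- estimate_tokens: len(text) // 4
def pvEstimateTokens (text : String) : Int := PySem.Int.floordiv (PySem.Str.len text) 4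

-- the for-loop of A, with its break/first-chunk-truncation branches
def pvLoopA : List (String × String) → List String → List String → Int → Int → List String × List String
  | [], result_texts, result_sources, _, _ => (result_texts, result_sources)
  | (text, source) :: rest, result_texts, result_sources, total_tokens, max_tokens =>
    let tokens := pvEstimateTokens text
    if total_tokens + tokens ≤ max_tokens then
      pvLoopA rest (result_texts ++ [text]) (result_sources ++ [source]) (total_tokens + tokens) max_tokens
    else
      if result_texts = [] then
        let chars_to_keep := max_tokens * 4 - 100
        if chars_to_keep > 0 then
          (result_texts ++ [PySem.Str.slice text none (some chars_to_keep) ++ "..."],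
           result_sources ++ [source])
        else (result_texts, result_sources)
      else (result_texts, result_sources)

def truncate_context (texts : List String) (sources : List String) (max_tokens : Int) : List String × List String :=
  if texts = [] ∨ sources = [] then ([], [])
  else
    let items := PySem.List.sorted (texts.zip sources) (fun x => PySem.Str.len x.1)
    pvLoopA items [] [] 0 max_tokens

-- ===== PORT B =====
def pvTok (t : String) : Int := PySem.Int.floordiv (PySem.Str.len t) 4

-- itertools.accumulate of the token counts (running sums)
def pvAccum : Int → List Int → List Int
  | _, [] => []
  | acc, x :: xs => (acc + x) :: pvAccum (acc + x) xs

def truncate_context_alt (texts : List String) (sources : List String) (max_tokens : Int) : List String × List String :=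
  if texts = [] ∨ sources = [] then ([], [])
  else
    let items := PySem.List.sorted (texts.zip sources) (fun x => PySem.Str.len x.1)
    let cumsums := pvAccum 0 (items.map (fun p => pvTok p.1))
    let k := PySem.List.bisectRight cumsums max_tokens
    if 1 ≤ k then ((items.take k).map Prod.fst, (items.take k).map Prod.snd)
    else
      let chars_to_keep := max_tokens * 4 - 100
      if chars_to_keep > 0 then
        match items with
        | (t0, s0) :: _ => ([PySem.Str.slice t0 none (some chars_to_keep) ++ "..."], [s0])
        | [] => ([], [])
      else ([], [])

-- ===== PRECONDITION & SPEC =====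
def Spec_truncate_context (texts : List String) (sources : List String) (max_tokens : Int) (out : List String × List String) : Prop := out = truncate_context_alt texts sources max_tokens
instance (texts : List String) (sources : List String) (max_tokens : Int) (out : List String × List String) : Decidable (Spec_truncate_context texts sources max_tokens out) := by unfold Spec_truncate_context; infer_instance

-- ===== CLAIM (what is proved, stated in full; the proofs are below) =====
def Claim_equal_truncate_context : Prop := ∀ (texts : List String) (sources : List String) (max_tokens : Int), Dom_truncate_context texts sources max_tokens → Spec_truncate_context texts sources max_tokens (truncate_context texts sources max_tokens)

-- ===== LEMMAS AND PROOFS =====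

-- greedy count of A's loop: number of items accepted before the break
def pvG : List (String × String) → Int → Int → Nat
  | [], _, _ => 0
  | (t, _) :: rest, total, mx => if total + pvTok t ≤ mx then pvG rest (total + pvTok t) mx + 1 else 0

lemma pvTok_nonneg (t : String) : 0 ≤ pvTok t := by
  simp only [pvTok, PySem.Int.floordiv, PySem.Str.len]
  exact Int.fdiv_nonneg (by positivity) (by norm_num)

lemma pvAccum_ge (base : Int) (toks : List Int) (h : ∀ x ∈ toks, 0 ≤ x) :
    ∀ y ∈ pvAccum base toks, base ≤ y := by
  induction toks generalizing base with
  | nil => simp [pvAccum]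
  | cons x xs ih =>
    intro y hy
    simp only [pvAccum, List.mem_cons] at hy
    have hx : 0 ≤ x := h x (by simp)
    rcases hy with rfl | hy
    · omega
    · have := ih (base + x) (fun z hz => h z (by simp [hz])) y hy
      omega

lemma pvAccum_pairwise (base : Int) (toks : List Int) (h : ∀ x ∈ toks, 0 ≤ x) :
    (pvAccum base toks).Pairwise (· ≤ ·) := by
  induction toks generalizing base with
  | nil => simp [pvAccum]
  | cons x xs ih =>
    simp only [pvAccum, List.pairwise_cons]
    exact ⟨pvAccum_ge (base + x) xs (fun z hz => h z (by simp [hz])),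
           ih (base + x) (fun z hz => h z (by simp [hz]))⟩

lemma takeWhile_getElem {α : Type} (p : α → Bool) (l : List α) (j : Nat)
    (hj : j < (l.takeWhile p).length) (hl : j < l.length) : p (l[j]'hl) = true := by
  induction l generalizing j with
  | nil => simp at hl
  | cons a t ih =>
    by_cases hpa : p a = true
    · cases j with
      | zero => simpa using hpa
      | succ j' =>
        simp only [List.takeWhile_cons, hpa, if_true, List.length_cons] at hj
        exact ih j' (by omega) (by simpa using hl)
    · simp [hpa] at hj

lemma takeWhile_stop {α : Type} (p : α → Bool) (l : List α)
    (h : (l.takeWhile p).length < l.length) :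
    p (l[(l.takeWhile p).length]'h) = false := by
  induction l with
  | nil => simp at h
  | cons a t ih =>
    by_cases hpa : p a = true
    · simp only [List.takeWhile_cons, hpa, if_true, List.length_cons] at h ⊢
      exact ih (by omega)
    · simp only [List.takeWhile_cons, hpa]
      simpa using hpa

lemma bisect_eq_takeWhile (l : List Int) (x : Int) (hp : l.Pairwise (· ≤ ·)) :
    PySem.List.bisectRight l x = (l.takeWhile (fun c => decide (c ≤ x))).length := by
  obtain ⟨hk, hle, hgt⟩ := PySem.List.bisectRight_spec l x hp
  set k := PySem.List.bisectRight l x with hkdef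
  set w := (l.takeWhile (fun c => decide (c ≤ x))).length with hwdef
  have hwlen : w ≤ l.length := by
    rw [hwdef]; exact (List.takeWhile_sublist _).length_le
  rcases lt_trichotomy k w with hlt' | he | hgt'
  · exfalso
    have hkl : k < l.length := lt_of_lt_of_le hlt' hwlen
    have h1 := hgt k hkl le_rfl
    have h2 := takeWhile_getElem (fun c => decide (c ≤ x)) l k (hwdef ▸ hlt') hkl
    simp at h2; omega
  · exact he
  · exfalso
    have hwl : w < l.length := lt_of_lt_of_le hgt' hk
    have h1 := hle w hwl hgt'
    have h2 := takeWhile_stop (fun c => decide (c ≤ x)) l (hwdef ▸ hwl)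
    simp only [← hwdef] at h2
    simp at h2; omega

lemma pvG_eq_takeWhile (items : List (String × String)) (total mx : Int) :
    pvG items total mx
      = ((pvAccum total (items.map (fun p => pvTok p.1))).takeWhile (fun c => decide (c ≤ mx))).length := by
  induction items generalizing total with
  | nil => simp [pvG, pvAccum]
  | cons a rest ih =>
    obtain ⟨t, s⟩ := a
    simp only [pvG, List.map_cons, pvAccum, List.takeWhile_cons]
    by_cases h : total + pvTok t ≤ mx
    · simp [h, ih (total + pvTok t)]
    · simp [h]

lemma bisect_eq_pvG (items : List (String × String)) (mx : Int) :
    PySem.List.bisectRight (pvAccum 0 (items.map (fun p => pvTok p.1))) mx = pvG items 0 mx := by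
  rw [bisect_eq_takeWhile _ _ (pvAccum_pairwise _ _ (by
        intro x hx
        obtain ⟨p, _, rfl⟩ := List.mem_map.mp hx
        exact pvTok_nonneg _)),
      pvG_eq_takeWhile]

-- A's loop, once something has been accepted, appends exactly the greedy prefix
lemma pvLoopA_ne_nil (items : List (String × String)) (rt rs : List String) (total mx : Int)
    (hrt : rt ≠ []) :
    pvLoopA items rt rs total mx
      = (rt ++ (items.take (pvG items total mx)).map Prod.fst,
         rs ++ (items.take (pvG items total mx)).map Prod.snd) := by
  induction items generalizing rt rs total with
  | nil => simp [pvLoopA, pvG]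
  | cons a rest ih =>
    obtain ⟨t, s⟩ := a
    simp only [pvLoopA, pvG]
    by_cases h : total + pvTok t ≤ mx
    · have : pvEstimateTokens t = pvTok t := rfl
      rw [this]
      simp only [h, if_true]
      rw [ih (rt ++ [t]) (rs ++ [s]) (total + pvTok t) (by simp)]
      simp [List.take_succ_cons]
    · have : pvEstimateTokens t = pvTok t := rfl
      rw [this]
      simp [h, hrt]

theorem truncate_context_eq (texts sources : List String) (max_tokens : Int) :
    truncate_context texts sources max_tokens = truncate_context_alt texts sources max_tokens := by
  unfold truncate_context truncate_context_alt
  by_cases hempty : texts = [] ∨ sources = []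
  · simp [hempty]
  · simp only [hempty, if_false]
    rw [bisect_eq_pvG]
    generalize hI : PySem.List.sorted (texts.zip sources) (fun x => PySem.Str.len x.1) = items
    have hne : items ≠ [] := by
      rw [← hI, Ne, PySem.List.sorted_eq_nil_iff, List.zip_eq_nil_iff]
      exact hempty
    obtain ⟨⟨t0, s0⟩, rest, rfl⟩ : ∃ a rest, items = a :: rest := by
      cases items with
      | nil => exact absurd rfl hne
      | cons a rest => exact ⟨a, rest, rfl⟩
    simp only [pvLoopA, pvG]
    by_cases hfit : 0 + pvTok t0 ≤ max_tokens
    · have : pvEstimateTokens t0 = pvTok t0 := rfl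
      rw [this]
      simp only [hfit, if_true]
      rw [show ([] : List String) ++ [t0] = [t0] from rfl, show ([] : List String) ++ [s0] = [s0] from rfl,
          pvLoopA_ne_nil rest [t0] [s0] (0 + pvTok t0) max_tokens (by simp)]
      simp [List.take_succ_cons]
    · have : pvEstimateTokens t0 = pvTok t0 := rfl
      rw [this]
      simp only [hfit, if_false]
      simp

-- ===== VERDICT (by name: the statement is the Claim_ definition above) =====
theorem truncate_context_spec : Claim_equal_truncate_context := by
  intro texts sources max_tokens _
  unfold Spec_truncate_context
  exact truncate_context_eq texts sources max_tokens
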